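-- pv_equiv track=rewrite | github.com/alzupon/zupon_andrew_hw3 | docker_files/lstm_train.py | tag_to_index
-- ===== SOURCE A (Python) =====
-- def tag_to_index(tagslist):
--     tag_dict = {"<unk>":0}
--     i=1
--     for x in tagslist:
--         for y in x:
--             if y in tag_dict:
--                 continue
--             else:
--                 tag_dict[y] = i
--                 i+=1
--     return tag_dict
-- ===== SOURCE B (Python) =====
-- def tag_to_index(tagslist):
--     flat = ["<unk>"] + [y for x in tagslist for y in x]
--     first = {t: j for j, t in reversed(list(enumerate(flat)))}
--     order = sorted(first, key=first.get)
--     return {t: i for i, t in enumerate(order)}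
-- ===== Notes on version B (the rewrite author's own statement) =====
-- stated objective: alternative
-- what changed: Instead of a forward pass growing a dict with a running counter, B computes each tag's first-occurrence position by one reversed overwrite pass over the flattened stream, then sorts the tags by that position and ranks them with enumerate.
import Mathlib
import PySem

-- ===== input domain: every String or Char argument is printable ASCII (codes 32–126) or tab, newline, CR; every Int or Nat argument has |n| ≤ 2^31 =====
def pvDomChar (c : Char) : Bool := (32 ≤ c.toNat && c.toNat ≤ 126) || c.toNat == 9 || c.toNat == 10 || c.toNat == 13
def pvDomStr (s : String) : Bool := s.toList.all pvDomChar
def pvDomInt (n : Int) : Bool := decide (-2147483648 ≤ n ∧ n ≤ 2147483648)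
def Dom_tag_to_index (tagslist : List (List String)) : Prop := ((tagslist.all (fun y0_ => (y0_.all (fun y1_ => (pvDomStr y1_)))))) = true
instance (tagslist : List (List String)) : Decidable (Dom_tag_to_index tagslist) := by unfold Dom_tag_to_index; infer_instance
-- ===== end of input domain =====

-- B replaces A's forward counter-dict pass with a different algorithm: a reversed
-- overwrite pass collecting first-occurrence positions, then a sort by position
-- and an enumerate ranking (alternative; same result, different strategy).


-- ===== PORT A =====
-- one step of A's inner loop: membership test, conditional insert, counter bump
def tagStep (st : PySem.Dict String Int × Int) (y : String) : PySem.Dict String Int × Int :=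
  if st.1.contains y then st else (st.1.insert y st.2, st.2 + 1)

def tag_to_index (tagslist : List (List String)) : List (String × Int) :=
  let st := tagslist.foldl (fun st x => x.foldl tagStep st)
    (PySem.Dict.ofList [("<unk>", 0)], 1)
  st.1.items

-- ===== PORT B =====
-- one step of B's reversed comprehension {t: j for j, t in reversed(...)}
def revStep (d : PySem.Dict String Int) (p : Int × String) : PySem.Dict String Int :=
  d.insert p.2 p.1

def tag_to_index_alt (tagslist : List (List String)) : List (String × Int) :=
  let flat := ["<unk>"] ++ tagslist.flatMap (fun x => x)
  let first := ((PySem.List.enumerate flat 0).reverse).foldl revStep PySem.Dict.empty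
  -- sorted(first, key=first.get): every sorted element is a key of 'first',
  -- so first.get never returns None here and getD _ 0 is exact
  let order := PySem.List.sorted first.keys (fun t => first.getD t 0) false
  (PySem.List.enumerate order 0).map (fun p => (p.2, p.1))

-- ===== PRECONDITION & SPEC =====
def Spec_tag_to_index (tagslist : List (List String)) (out : List (String × Int)) : Prop := out = tag_to_index_alt tagslist
instance (tagslist : List (List String)) (out : List (String × Int)) : Decidable (Spec_tag_to_index tagslist out) := by unfold Spec_tag_to_index; infer_instance

-- ===== CLAIM (what is proved, stated in full; the proofs are below) =====
def Claim_equal_tag_to_index : Prop := ∀ (tagslist : List (List String)), Dom_tag_to_index tagslist → Spec_tag_to_index tagslist (tag_to_index tagslist)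

-- ===== LEMMAS AND PROOFS =====
-- the dict whose items are exactly the distinct keys ks paired with 0,1,2,…
def dictOf (ks : List String) : PySem.Dict String Int :=
  PySem.Dict.mk ((PySem.List.enumerate ks 0).map (fun p => (p.2, p.1)))

lemma enumerate_append_singleton {α : Type} (xs : List α) (y : α) (s : Int) :
    PySem.List.enumerate (xs ++ [y]) s = PySem.List.enumerate xs s ++ [(s + xs.length, y)] := by
  induction xs generalizing s with
  | nil => simp [PySem.List.enumerate_nil, PySem.List.enumerate_cons]
  | cons a t ih =>
      simp [PySem.List.enumerate_cons, ih]
      ring_nf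

lemma keys_dictOf (ks : List String) : (dictOf ks).keys = ks := by
  simp [dictOf, PySem.Dict.keys, Function.comp_def, PySem.List.map_snd_enumerate]

lemma contains_dictOf (ks : List String) (y : String) :
    (dictOf ks).contains y = decide (y ∈ ks) := by
  rw [PySem.Dict.contains_eq_decide_mem_keys, keys_dictOf]

lemma insert_dictOf (ks : List String) (y : String) (hy : y ∉ ks) :
    (dictOf ks).insert y ks.length = dictOf (ks ++ [y]) := by
  apply PySem.Dict.ext
  rw [PySem.Dict.items_insert_of_not_contains]
  · simp [dictOf, enumerate_append_singleton]
  · simp [contains_dictOf, hy]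

-- invariant of A's loop: the dict holds the distinct tags seen, in order,
-- and the counter equals their number
lemma loopInvA (l ks : List String) :
    l.foldl tagStep (dictOf ks, (ks.length : Int)) =
      (dictOf (l.foldl PySem.Set.add ks), ((l.foldl PySem.Set.add ks).length : Int)) := by
  induction l generalizing ks with
  | nil => simp
  | cons y t ih =>
      by_cases hy : y ∈ ks
      · have hadd : PySem.Set.add ks y = ks := by simp [PySem.Set.add, hy]
        have hstep : tagStep (dictOf ks, (ks.length : Int)) y = (dictOf ks, (ks.length : Int)) := by
          simp [tagStep, contains_dictOf, hy]
        rw [List.foldl_cons, List.foldl_cons, hadd, hstep, ih]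
      · have hadd : PySem.Set.add ks y = ks ++ [y] := by simp [PySem.Set.add, hy]
        have hstep : tagStep (dictOf ks, (ks.length : Int)) y = (dictOf (ks ++ [y]), (((ks ++ [y]).length : Nat) : Int)) := by
          simp [tagStep, contains_dictOf, hy, insert_dictOf ks y hy]
        rw [List.foldl_cons, List.foldl_cons, hadd, hstep, ih]

lemma ofList_cons_unk (l : List String) :
    PySem.Set.ofList ("<unk>" :: l) = l.foldl PySem.Set.add ["<unk>"] := by
  simp [PySem.Set.ofList_eq_foldl, List.foldl_cons, PySem.Set.add]

-- B-side: the reversed overwrite fold answers lookups by the FIRST matching pair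
lemma get?_foldl_revStep (ps : List (Int × String)) (d : PySem.Dict String Int) (k : String) :
    (ps.foldl revStep d).get? k =
      ((ps.reverse.find? (fun p => p.2 == k)).map Prod.fst).or (d.get? k) := by
  induction ps generalizing d with
  | nil => simp
  | cons p ps ih =>
      rw [List.foldl_cons, ih, List.reverse_cons, List.find?_append]
      cases hfind : ps.reverse.find? (fun p => p.2 == k) with
      | some q => simp
      | none =>
          by_cases hk : k = p.2
          · subst hk
            simp [revStep, PySem.Dict.get?_insert_self]
          · have : (p.2 == k) = false := by simpa [beq_iff_eq] using fun h => hk h.symm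
            simp [revStep, this, PySem.Dict.get?_insert_of_ne _ _ hk]

-- the first matching pair of enumerate is the first occurrence
lemma find?_enumerate_of_index? (l : List String) (k : String) (i : Nat) (s : Int)
    (h : PySem.List.index? l k = some i) :
    (PySem.List.enumerate l s).find? (fun p => p.2 == k) = some (s + (i : Int), k) := by
  induction l generalizing s i with
  | nil => simp [PySem.List.index?_eq_idxOf?, List.idxOf?] at h
  | cons x xs ih =>
      by_cases hx : x = k
      · subst hx
        rw [PySem.List.index?_cons_self] at h
        obtain rfl : (0 : Nat) = i := by simpa using h
        simp [PySem.List.enumerate_cons]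
      · rw [PySem.List.index?_cons_of_ne _ hx] at h
        obtain ⟨j, hj, rfl⟩ := Option.map_eq_some_iff.mp h
        have hbeq : (x == k) = false := by simpa [beq_iff_eq] using hx
        rw [PySem.List.enumerate_cons, List.find?_cons_of_neg (by simp [hbeq]), ih _ _ hj]
        congr 1
        push_cast
        ring_nf

lemma index?_lt_length (l : List String) (k : String) (i : Nat)
    (h : PySem.List.index? l k = some i) : i < l.length := by
  obtain ⟨pre, suf, rfl, rfl, -⟩ := (PySem.List.index?_eq_some_iff _ _ _).mp h
  simp

-- the distinct tags, in first-occurrence order, have strictly increasing first indices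
lemma ofList_pairwise_index (l : List String) :
    (PySem.Set.ofList l).Pairwise
      (fun a b => (PySem.List.index? l a).getD 0 < (PySem.List.index? l b).getD 0) := by
  induction l using List.reverseRecOn with
  | nil => simp
  | append_singleton l y ih =>
      have hof : PySem.Set.ofList (l ++ [y]) = PySem.Set.add (PySem.Set.ofList l) y := by
        rw [PySem.Set.ofList_eq_foldl, List.foldl_append, ← PySem.Set.ofList_eq_foldl]
        rfl
      have hkeep : ∀ t ∈ PySem.Set.ofList l,
          PySem.List.index? (l ++ [y]) t = PySem.List.index? l t := fun t ht =>
        PySem.List.index?_append_of_mem _ ((PySem.Set.mem_ofList l t).mp ht)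
      by_cases hy : y ∈ l
      · have : PySem.Set.add (PySem.Set.ofList l) y = PySem.Set.ofList l := by
          simp [PySem.Set.add, (PySem.Set.mem_ofList l y).mpr hy]
        rw [hof, this]
        exact ih.imp_of_mem (fun ha hb hab => by rw [hkeep _ ha, hkeep _ hb]; exact hab)
      · have hy' : y ∉ PySem.Set.ofList l := fun hm => hy ((PySem.Set.mem_ofList l y).mp hm)
        have : PySem.Set.add (PySem.Set.ofList l) y = PySem.Set.ofList l ++ [y] := by
          simp [PySem.Set.add, hy']
        rw [hof, this]
        apply List.pairwise_append.mpr
        refine ⟨ih.imp_of_mem (fun ha hb hab => by rw [hkeep _ ha, hkeep _ hb]; exact hab),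
          List.pairwise_singleton _ _, ?_⟩
        intro a ha b hb
        obtain rfl : b = y := by simpa using hb
        rw [hkeep _ ha, PySem.List.index?_append_singleton_self _ _ hy]
        have hmem : a ∈ l := (PySem.Set.mem_ofList l a).mp ha
        obtain ⟨i, hi⟩ := Option.isSome_iff_exists.mp ((PySem.List.index?_isSome_iff _ _).mpr hmem)
        rw [hi]
        simpa using index?_lt_length l a i hi

-- the key used by B's sort is the first-occurrence index
lemma getD_firstDict (l : List String) (t : String) (i : Nat)
    (hi : PySem.List.index? l t = some i) :
    (((PySem.List.enumerate l 0).reverse).foldl revStep PySem.Dict.empty).getD t 0 = (i : Int) := by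
  rw [PySem.Dict.getD_eq_get?_getD, get?_foldl_revStep, List.reverse_reverse,
    find?_enumerate_of_index? l t i 0 hi]
  simp

lemma keys_firstDict (l : List String) :
    (((PySem.List.enumerate l 0).reverse).foldl revStep PySem.Dict.empty).keys =
      PySem.Set.ofList l.reverse := by
  have h := PySem.Dict.keys_foldl_insert_key (κ := String) (ν := Int) (β := Int × String)
    ((PySem.List.enumerate l 0).reverse) Prod.snd (fun _ p => p.1) PySem.Dict.empty
  have h2 : ((PySem.List.enumerate l 0).reverse).foldl revStep PySem.Dict.empty =
      ((PySem.List.enumerate l 0).reverse).foldl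
        (fun d x => d.insert (Prod.snd x) ((fun (_ : PySem.Dict String Int) (p : Int × String) => p.1) d x))
        PySem.Dict.empty := rfl
  rw [h2, h]
  simp [PySem.Set.update, PySem.Set.ofList_eq_foldl, List.map_reverse,
    PySem.List.map_snd_enumerate, PySem.Dict.keys_empty]

-- B's sorted order is exactly the first-occurrence (dedup) order
lemma order_eq (l : List String) :
    (PySem.List.sorted
        ((((PySem.List.enumerate l 0).reverse).foldl revStep PySem.Dict.empty)).keys
        (fun t => (((PySem.List.enumerate l 0).reverse).foldl revStep PySem.Dict.empty).getD t 0)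
        false) = PySem.Set.ofList l := by
  apply PySem.List.sorted_eq_of_perm_of_pairwise_lt
  · rw [keys_firstDict]
    refine (List.perm_ext_iff_of_nodup (PySem.Set.nodup_ofList _) (PySem.Set.nodup_ofList _)).mpr ?_
    intro a
    rw [PySem.Set.mem_ofList, PySem.Set.mem_ofList, List.mem_reverse]
  · refine (ofList_pairwise_index l).imp_of_mem ?_
    intro a b ha hb hab
    have hma : a ∈ l := (PySem.Set.mem_ofList l a).mp ha
    have hmb : b ∈ l := (PySem.Set.mem_ofList l b).mp hb
    obtain ⟨i, hi⟩ := Option.isSome_iff_exists.mp ((PySem.List.index?_isSome_iff _ _).mpr hma)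
    obtain ⟨j, hj⟩ := Option.isSome_iff_exists.mp ((PySem.List.index?_isSome_iff _ _).mpr hmb)
    rw [getD_firstDict l a i hi, getD_firstDict l b j hj]
    rw [hi, hj] at hab
    simpa using hab

-- ===== VERDICT (by name: the statement is the Claim_ definition above) =====
theorem tag_to_index_spec : Claim_equal_tag_to_index := by
  intro tagslist _
  show tag_to_index tagslist = tag_to_index_alt tagslist
  unfold tag_to_index tag_to_index_alt
  rw [← List.foldl_flatten]
  have h0 : (PySem.Dict.ofList [("<unk>", (0 : Int))], (1 : Int)) = (dictOf ["<unk>"], ((["<unk>"] : List String).length : Int)) := by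
    decide
  rw [h0, loopInvA]
  simp only [List.flatMap_id', List.singleton_append]
  rw [order_eq ("<unk>" :: tagslist.flatten), ← ofList_cons_unk]
  rfl
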